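-- pv_equiv track=rewrite | github.com/YJJ1508/Algorithm | 프로그래머스/2/77885. 2개 이하로 다른 비트/2개 이하로 다른 비트.py | f
-- ===== SOURCE A (Python) =====
-- def f(x):
--     #1.짝수일 경우 끝자리 +1
--     if x % 2 == 0:
--         return x+1
--
--     #2.홀수일 경우
--     else:
--         b_x = bin(x)[2:]
--         #0이 섞여있는지 확인
--         idx = 0
--         for i in range(len(b_x)-1, -1, -1):
--             if b_x[i] != '1':
--                 idx = i
--                 break
--         #2-1. 모든 원소 1일때
--         if idx == 0:
--             b_x = '10' + b_x[1:]  #'10'+ 맨앞비트 제외 나머지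
--             return int(b_x, 2)
--         #2-2. 0,1 혼합
--         else:
--             #마지막 01 -> 10으로
--             b_x = b_x[:idx] + '10' + b_x[idx+2:] #
--             return int(b_x, 2)
-- ===== SOURCE B (Python) =====
-- def f(x):
--     # pure two's-complement bit arithmetic: set the lowest 0 bit, clear the bit below it
--     low0 = (x + 1) & ~x          # isolates the lowest zero bit of x
--     return (x | low0) & ~(low0 >> 1)
-- ===== Notes on version B (the rewrite author's own statement) =====
-- stated objective: simpler
-- what changed: Replaces the bin()-string scan-and-splice (find rightmost '0', rebuild the string, reparse with int(.,2)) by three integer bit operations: low0=(x+1)&~x isolates the lowest zero bit, and (x|low0)&~(low0>>1) sets it and clears the bit below, covering the even, all-ones and mixed cases uniformly with no loop or string.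
-- intended difference: On negative odd x whose absolute value is one less than a power of two (x = -1, -3, -7, ...), A's slicing of bin(x) = '-0b...' leaves a stray 'b', its scan then reports index zero and A returns a positive value (A(-1) = 5), while B returns the two's-complement result of the same flip rule (B(-1) = -1); B's value is the intended extension of the rule, A's is an accident of string slicing. — e.g. on f(-1): A returns 5, B returns -1
import Mathlib
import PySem

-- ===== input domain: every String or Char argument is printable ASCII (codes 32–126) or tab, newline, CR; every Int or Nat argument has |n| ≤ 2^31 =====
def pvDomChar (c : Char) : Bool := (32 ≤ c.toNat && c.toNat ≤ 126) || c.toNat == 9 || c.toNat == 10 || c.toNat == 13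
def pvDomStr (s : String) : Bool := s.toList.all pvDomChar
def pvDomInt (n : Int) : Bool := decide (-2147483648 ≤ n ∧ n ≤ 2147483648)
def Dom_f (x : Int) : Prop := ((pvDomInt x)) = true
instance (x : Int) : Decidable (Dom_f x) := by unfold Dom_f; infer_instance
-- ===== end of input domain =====

-- B replaces A's bin()-string scan-and-splice by three two's-complement bit operations (no loop, no strings).
-- ===== PORT A =====

-- binary digits of n, most significant first: bin(n) without the '0b' prefix (n > 0 in every reachable use)
def natBits (n : Nat) : List Char :=
  if h : n = 0 then []
  else natBits (n / 2) ++ [if n % 2 = 1 then '1' else '0']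
decreasing_by exact Nat.div_lt_self (Nat.pos_of_ne_zero h) one_lt_two

-- bin(x)[2:] — for x < 0, bin(x) = '-0b…' so [2:] keeps a stray 'b' (exact for x ≠ 0, the only reachable case)
def binStr (x : Int) : List Char :=
  if x < 0 then 'b' :: natBits (-x).toNat else natBits x.toNat

-- 'idx = 0; for i in range(len(b_x)-1,-1,-1): if b_x[i] != '1': idx = i; break' — every visited index is
-- a valid non-negative index, so List.getD is exact here
def scanIdx (b : List Char) : Nat → Int
  | 0 => 0
  | j + 1 => if b.getD j ' ' != '1' then (j : Int) else scanIdx b j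

-- int(s, 2): none exactly where Python raises ValueError (s empty or containing a non-binary character)
def int2? (s : List Char) : Option Int :=
  if s ≠ [] ∧ s.all (fun c => c == '0' || c == '1') then
    some (s.foldl (fun (a : Int) c => 2 * a + (if c == '1' then 1 else 0)) 0)
  else none

def f (x : Int) : Int :=
  if x % 2 == 0 then x + 1
  else
    let b_x := binStr x
    let idx := scanIdx b_x b_x.length
    if idx == 0 then
      -- '10' + b_x[1:]   (the .getD 0 is unreachable under Pre_f: Python raises where int2? is none)
      (int2? ('1' :: '0' :: PySem.List.slice b_x (some 1) none)).getD 0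
    else
      -- b_x[:idx] + '10' + b_x[idx+2:]
      (int2? (PySem.List.slice b_x none (some idx) ++ '1' :: '0' ::
              PySem.List.slice b_x (some (idx + 2)) none)).getD 0

-- ===== PORT B =====
-- Python's &, |, ~, >> on ints are Int.land / Int.lor / Int.not / Int.shiftRight (two's complement,
-- arithmetic shift) — exact on all integers
def f_alt (x : Int) : Int :=
  let low0 := Int.land (x + 1) (Int.not x)
  Int.land (Int.lor x low0) (Int.not (Int.shiftRight low0 1))

-- ===== PRECONDITION & SPEC =====
-- Pre_f excludes exactly the negative odd x whose absolute value is NOT one less than a power of two: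
-- there A raises ValueError (int(s,2) is fed a string still containing 'b'); on every other input A
-- returns normally, so Pre_f covers A's whole returning domain.
def Pre_f (x : Int) : Prop := 0 ≤ x ∨ x % 2 = 0 ∨ Int.land (-x) (1 - x) = 0
instance (x : Int) : Decidable (Pre_f x) := by unfold Pre_f; infer_instance
def pvWitness_f : Int := 5

-- On negative odd x whose absolute value is one less than a power of two (x = -1, -3, -7, …) A's
-- slicing of bin(x) = '-0b…' leaves a stray 'b', its scan then reports index zero and A returns a
-- positive value (f (-1) = 5); B returns the two's-complement result of the same flip rule
-- (f_alt (-1) = -1), the intended value.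
def D_f (x : Int) : Prop := x < 0 ∧ x % 2 = 1 ∧ Int.land (-x) (1 - x) = 0
instance (x : Int) : Decidable (D_f x) := by unfold D_f; infer_instance

def Spec_f (x : Int) (out : Int) : Prop := ¬ D_f x → out = f_alt x
instance (x : Int) (out : Int) : Decidable (Spec_f x out) := by unfold Spec_f; infer_instance

def pvDiffWitness_f : Int := -1
def pvDiffWitnessOut_f : Int × Int := (5, -1)

-- ===== CLAIM (what is proved, stated in full; the proofs are below) =====
def Claim_unchanged_f : Prop := ∀ (x : Int), Dom_f x → Pre_f x → Spec_f x (f x)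
def Claim_changed_f : Prop := Dom_f (pvDiffWitness_f) ∧ Pre_f (pvDiffWitness_f) ∧ D_f (pvDiffWitness_f) ∧ f (pvDiffWitness_f) = pvDiffWitnessOut_f.1 ∧ f_alt (pvDiffWitness_f) = pvDiffWitnessOut_f.2 ∧ pvDiffWitnessOut_f.1 ≠ pvDiffWitnessOut_f.2
def Claim_exact_f : Prop := ∀ (x : Int), Dom_f x → Pre_f x → D_f x → f x ≠ f_alt x

-- ===== LEMMAS AND PROOFS =====

-- ---- Int bitwise constructor equations ----
theorem int_not_ofNat (n : Nat) : Int.not (Int.ofNat n) = Int.negSucc n := rfl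
theorem int_not_negSucc (n : Nat) : Int.not (Int.negSucc n) = Int.ofNat n := rfl
theorem int_land_ofNat_negSucc (m n : Nat) :
    Int.land (Int.ofNat m) (Int.negSucc n) = Int.ofNat (Nat.ldiff m n) := rfl
theorem int_land_negSucc_ofNat (m n : Nat) :
    Int.land (Int.negSucc m) (Int.ofNat n) = Int.ofNat (Nat.ldiff n m) := rfl
theorem int_land_negSucc_negSucc (m n : Nat) :
    Int.land (Int.negSucc m) (Int.negSucc n) = Int.negSucc (m ||| n) := rfl
theorem int_land_ofNat_ofNat (m n : Nat) :
    Int.land (Int.ofNat m) (Int.ofNat n) = Int.ofNat (m &&& n) := rfl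
theorem int_lor_ofNat_ofNat (m n : Nat) :
    Int.lor (Int.ofNat m) (Int.ofNat n) = Int.ofNat (m ||| n) := rfl
theorem int_lor_negSucc_ofNat (m n : Nat) :
    Int.lor (Int.negSucc m) (Int.ofNat n) = Int.negSucc (Nat.ldiff m n) := rfl
theorem int_shiftRight_ofNat (m : Nat) (s : Nat) :
    Int.shiftRight (Int.ofNat m) s = Int.ofNat (m >>> s) := rfl
theorem int_negSucc_add_one (b : Nat) : Int.negSucc (b + 1) + 1 = Int.negSucc b := by
  rw [Int.negSucc_eq, Int.negSucc_eq]; push_cast; ring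
theorem int_ofNat_add_one (n : Nat) : Int.ofNat n + 1 = Int.ofNat (n + 1) := rfl

-- ---- Nat bit lemmas ----
theorem ldiff_zero' (a : Nat) : Nat.ldiff a 0 = a := by
  apply Nat.eq_of_testBit_eq; intro i
  simp [Nat.testBit_ldiff]

theorem ldiff_succ_even {a : Nat} (h : a % 2 = 0) : Nat.ldiff (a + 1) a = 1 := by
  apply Nat.eq_of_testBit_eq; intro i
  cases i with
  | zero =>
      have h1 : (a + 1) % 2 = 1 := by omega
      rw [Nat.testBit_ldiff, Nat.testBit_zero, Nat.testBit_zero, Nat.testBit_zero, h, h1]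
      simp
  | succ i =>
      rw [Nat.testBit_ldiff, Nat.testBit_succ, Nat.testBit_succ, Nat.testBit_succ]
      have h1 : (a + 1) / 2 = a / 2 := by omega
      have h2 : (1 : Nat) / 2 = 0 := by omega
      rw [h1, h2, Nat.zero_testBit]
      simp

theorem lor_one_even {a : Nat} (h : a % 2 = 0) : a ||| 1 = a + 1 := by
  apply Nat.eq_of_testBit_eq; intro i
  cases i with
  | zero =>
      have h1 : (a + 1) % 2 = 1 := by omega
      rw [Nat.testBit_lor, Nat.testBit_zero, Nat.testBit_zero, Nat.testBit_zero, h, h1]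
      simp
  | succ i =>
      rw [Nat.testBit_lor, Nat.testBit_succ, Nat.testBit_succ, Nat.testBit_succ]
      have h1 : (a + 1) / 2 = a / 2 := by omega
      have h2 : (1 : Nat) / 2 = 0 := by omega
      rw [h1, h2, Nat.zero_testBit]
      simp

theorem ldiff_one_odd {a : Nat} (h : a % 2 = 1) : Nat.ldiff a 1 = a - 1 := by
  apply Nat.eq_of_testBit_eq; intro i
  cases i with
  | zero =>
      have h1 : (a - 1) % 2 = 0 := by omega
      rw [Nat.testBit_ldiff, Nat.testBit_zero, Nat.testBit_zero, Nat.testBit_zero, h, h1]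
      simp
  | succ i =>
      rw [Nat.testBit_ldiff, Nat.testBit_succ, Nat.testBit_succ, Nat.testBit_succ]
      have h1 : (a - 1) / 2 = a / 2 := by omega
      have h2 : (1 : Nat) / 2 = 0 := by omega
      rw [h1, h2, Nat.zero_testBit]
      simp

theorem ldiff_succ_self_eq (c k : Nat) :
    Nat.ldiff (2 ^ (k+1) * c + 2 ^ k) (2 ^ (k+1) * c + (2 ^ k - 1)) = 2 ^ k := by
  have hp : 1 ≤ 2 ^ k := Nat.one_le_two_pow
  have h1 : 2 ^ k < 2 ^ (k+1) := by have := Nat.pow_succ 2 k; omega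
  have h2 : 2 ^ k - 1 < 2 ^ (k+1) := by omega
  apply Nat.eq_of_testBit_eq; intro j
  rw [Nat.testBit_ldiff, Nat.testBit_two_pow_mul_add c h1 j,
      Nat.testBit_two_pow_mul_add c h2 j, Nat.testBit_two_pow]
  by_cases hj : j < k + 1
  · simp only [hj, if_pos]
    rw [Nat.testBit_two_pow_sub_one]
    by_cases hjk : k = j
    · subst hjk; simp
    · simp [hjk]
  · simp only [hj, if_neg]
    have : ¬ (k = j) := by omega
    simp [this]

theorem lor_two_pow_eq (c k : Nat) :
    (2 ^ (k+1) * c + (2 ^ k - 1)) ||| 2 ^ k = 2 ^ (k+1) * c + (2 ^ (k+1) - 1) := by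
  have hp : 1 ≤ 2 ^ k := Nat.one_le_two_pow
  have hq : 1 ≤ 2 ^ (k+1) := Nat.one_le_two_pow
  have h1 : 2 ^ k < 2 ^ (k+1) := by have := Nat.pow_succ 2 k; omega
  have h2 : 2 ^ k - 1 < 2 ^ (k+1) := by omega
  have h3 : 2 ^ (k+1) - 1 < 2 ^ (k+1) := by omega
  apply Nat.eq_of_testBit_eq; intro j
  rw [Nat.testBit_lor, Nat.testBit_two_pow_mul_add c h2 j,
      Nat.testBit_two_pow_mul_add c h3 j, Nat.testBit_two_pow]
  by_cases hj : j < k + 1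
  · simp only [hj, if_pos]
    rw [Nat.testBit_two_pow_sub_one, Nat.testBit_two_pow_sub_one]
    by_cases hjk : k = j
    · subst hjk; simp
    · have hlt : j < k := by omega
      simp [hjk, hlt, hj]
  · simp only [hj, if_neg]
    have : ¬ (k = j) := by omega
    simp [this]

theorem ldiff_low_eq (c k : Nat) (hk : 1 ≤ k) :
    Nat.ldiff (2 ^ (k+1) * c + (2 ^ (k+1) - 1)) (2 ^ (k-1))
      = 2 ^ (k+1) * c + (2 ^ (k+1) - 1 - 2 ^ (k-1)) := by
  have e1 : k - 1 + 1 = k := by omega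
  have e2 : 2 ^ k = 2 * 2 ^ (k-1) := by
    conv_lhs => rw [← e1]; rw [Nat.pow_succ]
    ring
  have e3 : 2 ^ (k+1) = 2 * 2 ^ k := by rw [Nat.pow_succ]; ring
  have hp : 1 ≤ 2 ^ (k-1) := Nat.one_le_two_pow
  have h3 : 2 ^ (k+1) - 1 < 2 ^ (k+1) := by omega
  have hb : 2 ^ (k+1) - 1 - 2 ^ (k-1) = 2 ^ k * 1 + (2 ^ (k-1) - 1) := by omega
  have hb2 : 2 ^ (k-1) - 1 < 2 ^ k := by omega
  have hblt : 2 ^ (k+1) - 1 - 2 ^ (k-1) < 2 ^ (k+1) := by omega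
  apply Nat.eq_of_testBit_eq; intro j
  rw [Nat.testBit_ldiff, Nat.testBit_two_pow_mul_add c h3 j,
      Nat.testBit_two_pow_mul_add c hblt j, Nat.testBit_two_pow]
  by_cases hj : j < k + 1
  · simp only [hj, if_pos]
    rw [Nat.testBit_two_pow_sub_one, hb, Nat.testBit_two_pow_mul_add 1 hb2 j]
    by_cases hjk : j < k
    · simp only [hjk, if_pos]
      rw [Nat.testBit_two_pow_sub_one]
      by_cases hjk1 : k - 1 = j
      · subst hjk1
        simp [hj]
      · have hlt : j < k - 1 := by omega
        simp [hjk1, hlt, hj]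
    · have hjk' : j = k := by omega
      subst hjk'
      simp only [hjk, if_neg]
      have hne : ¬ (j - 1 = j) := by omega
      have ht1 : Nat.testBit 1 (j - j) = true := by simp [Nat.testBit_zero]
      simp [hne, hj, ht1]
  · simp only [hj, if_neg]
    have : ¬ (k - 1 = j) := by omega
    simp [this]

-- ---- B-side characterisations ----
theorem falt_even (x : Int) (h : x % 2 = 0) : f_alt x = x + 1 := by
  simp only [f_alt]
  cases x with
  | ofNat n =>
      have hn : n % 2 = 0 := by have h' : (n : Int) % 2 = 0 := h; omega
      rw [int_ofNat_add_one, int_not_ofNat, int_land_ofNat_negSucc, ldiff_succ_even hn,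
          int_lor_ofNat_ofNat, lor_one_even hn,
          int_shiftRight_ofNat, show (1 : Nat) >>> 1 = 0 from rfl,
          int_not_ofNat, int_land_ofNat_negSucc]
      rw [show Nat.ldiff (n+1) 0 = n + 1 from ldiff_zero' _]
  | negSucc a =>
      have ha : a % 2 = 1 := by
        have : Int.negSucc a = -(a+1 : Nat) := Int.negSucc_eq a
        omega
      obtain ⟨b, hb⟩ : ∃ b, a = b + 1 := ⟨a - 1, by omega⟩
      subst hb
      have hb2 : b % 2 = 0 := by omega
      rw [int_negSucc_add_one, int_not_negSucc, int_land_negSucc_ofNat, ldiff_succ_even hb2,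
          int_lor_negSucc_ofNat, ldiff_one_odd ha,
          int_shiftRight_ofNat, show (1 : Nat) >>> 1 = 0 from rfl,
          int_not_ofNat, int_land_negSucc_negSucc]
      have hb3 : b + 1 - 1 ||| 0 = b := by simp
      rw [hb3]

theorem falt_odd (n c k : Nat) (hk : 1 ≤ k) (hn : n = 2 ^ (k+1) * c + (2 ^ k - 1)) :
    f_alt (Int.ofNat n) = Int.ofNat (n + 2 ^ (k-1)) := by
  have hp : 1 ≤ 2 ^ k := Nat.one_le_two_pow
  have hpk1 : 2 ^ (k+1) = 2 * 2 ^ k := by rw [Nat.pow_succ]; ring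
  have e1 : k - 1 + 1 = k := by omega
  have e2 : 2 ^ k = 2 * 2 ^ (k-1) := by conv_lhs => rw [← e1, Nat.pow_succ, Nat.mul_comm]
  have hp1 : 1 ≤ 2 ^ (k-1) := Nat.one_le_two_pow
  subst hn
  simp only [f_alt]
  rw [int_ofNat_add_one,
      show 2 ^ (k+1) * c + (2 ^ k - 1) + 1 = 2 ^ (k+1) * c + 2 ^ k from by omega,
      int_not_ofNat, int_land_ofNat_negSucc, ldiff_succ_self_eq, int_lor_ofNat_ofNat,
      lor_two_pow_eq, int_shiftRight_ofNat,
      show (2 ^ k) >>> 1 = 2 ^ (k-1) from by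
        rw [Nat.shiftRight_succ, Nat.shiftRight_zero]; omega,
      int_not_ofNat, int_land_ofNat_negSucc, ldiff_low_eq c k hk]
  congr 1
  have hq : 1 ≤ 2 ^ (k+1) := Nat.one_le_two_pow
  omega

-- ---- A-side: natBits ----
theorem natBits_zero : natBits 0 = [] := by rw [natBits]; simp

theorem natBits_two_mul_add_one (c : Nat) : natBits (2 * c + 1) = natBits c ++ ['1'] := by
  rw [natBits]
  have h1 : ¬ (2 * c + 1 = 0) := by omega
  have h2 : (2 * c + 1) / 2 = c := by omega
  have h3 : (2 * c + 1) % 2 = 1 := by omega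
  simp [h1, h2, h3]

theorem natBits_two_mul (c : Nat) (hc : c ≠ 0) : natBits (2 * c) = natBits c ++ ['0'] := by
  rw [natBits]
  have h1 : ¬ (2 * c = 0) := by omega
  have h2 : (2 * c) / 2 = c := by omega
  have h3 : ¬ ((2 * c) % 2 = 1) := by omega
  simp [h1, h2, h3]

theorem natBits_ones (k : Nat) : natBits (2 ^ k - 1) = List.replicate k '1' := by
  induction k with
  | zero => simpa using natBits_zero
  | succ k ih =>
      have h : 2 ^ (k+1) - 1 = 2 * (2 ^ k - 1) + 1 := by
        have : 1 ≤ 2 ^ k := Nat.one_le_two_pow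
        have : 2 ^ (k+1) = 2 * 2 ^ k := by rw [Nat.pow_succ]; ring
        omega
      rw [h, natBits_two_mul_add_one, ih, List.replicate_succ']

theorem natBits_decomp (c k : Nat) (hc : c ≠ 0) (hk : 1 ≤ k) :
    natBits (2 ^ (k+1) * c + (2 ^ k - 1)) = natBits c ++ '0' :: List.replicate k '1' := by
  induction k with
  | zero => omega
  | succ k ih =>
      by_cases hk0 : k = 0
      · subst hk0
        have h : 2 ^ 2 * c + (2 ^ 1 - 1) = 2 * (2 * c) + 1 := by ring_nf
        rw [h, natBits_two_mul_add_one, natBits_two_mul c hc]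
        simp
      · have hk1 : 1 ≤ k := by omega
        have h : 2 ^ (k+2) * c + (2 ^ (k+1) - 1)
            = 2 * (2 ^ (k+1) * c + (2 ^ k - 1)) + 1 := by
          have h0 : 1 ≤ 2 ^ k := Nat.one_le_two_pow
          have e1 : 2 ^ (k+1) = 2 * 2 ^ k := by rw [Nat.pow_succ]; ring
          have e2 : 2 ^ (k+2) = 2 * 2 ^ (k+1) := by rw [Nat.pow_succ]; ring
          have e4 : 2 ^ (k+2) * c = 2 * (2 ^ (k+1) * c) := by rw [e2]; ring
          omega
        rw [h, natBits_two_mul_add_one, ih hk1, List.replicate_succ']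
        simp

theorem natBits_bits (n : Nat) : ∀ ch ∈ natBits n, ch = '0' ∨ ch = '1' := by
  induction n using Nat.strong_induction_on with
  | _ n ih =>
      intro ch hch
      by_cases h : n = 0
      · rw [natBits] at hch; simp [h] at hch
      · rw [natBits, dif_neg h] at hch
        rcases List.mem_append.mp hch with hch | hch
        · exact ih (n / 2) (Nat.div_lt_self (Nat.pos_of_ne_zero h) one_lt_two) ch hch
        · have hc : ch = if n % 2 = 1 then '1' else '0' := by simpa using hch
          by_cases hm : n % 2 = 1 <;> simp [hm] at hc <;> simp [hc]

theorem natBits_ne_nil (n : Nat) (h : n ≠ 0) : natBits n ≠ [] := by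
  rw [natBits]; simp [h]

-- ---- scanIdx ----
theorem scanIdx_ones (b : List Char) (j : Nat)
    (h : ∀ i, i < j → b.getD i ' ' = '1') : scanIdx b j = 0 := by
  induction j with
  | zero => rfl
  | succ j ih =>
      have h1 : b.getD j ' ' = '1' := h j (by omega)
      rw [scanIdx, h1]
      simp only [bne_self_eq_false, Bool.false_eq_true, if_false]
      exact ih (fun i hi => h i (by omega))

theorem scanIdx_find (b : List Char) (L j : Nat) (hL : L < j)
    (hup : ∀ i, L < i → i < j → b.getD i ' ' = '1')
    (hz : b.getD L ' ' ≠ '1') : scanIdx b j = (L : Int) := by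
  induction j with
  | zero => omega
  | succ j ih =>
      rw [scanIdx]
      by_cases hj : j = L
      · subst hj
        rw [if_pos (by simpa [bne_iff_ne] using hz)]
      · have h1 : b.getD j ' ' = '1' := hup j (by omega) (by omega)
        rw [h1]
        simp only [bne_self_eq_false, Bool.false_eq_true, if_false]
        exact ih (by omega) (fun i hi hi2 => hup i hi (by omega))

-- ---- parsing ----
theorem parse_shift (s : List Char) (a : Int) :
    s.foldl (fun a c => 2 * a + (if c == '1' then 1 else 0)) a
      = a * 2 ^ s.length + s.foldl (fun a c => 2 * a + (if c == '1' then 1 else 0)) 0 := by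
  induction s generalizing a with
  | nil => simp
  | cons c s ih =>
      simp only [List.foldl_cons, List.length_cons]
      rw [ih (2 * a + _), ih (2 * 0 + _)]
      ring

theorem parse_replicate_one (k : Nat) :
    (List.replicate k '1').foldl (fun (a : Int) c => 2 * a + (if c == '1' then 1 else 0)) 0
      = 2 ^ k - 1 := by
  induction k with
  | zero => simp
  | succ k ih =>
      rw [List.replicate_succ', List.foldl_append, ih]
      have h1 : 1 ≤ (2:Int) ^ k := one_le_pow₀ (by omega)
      simp only [List.foldl_cons, List.foldl_nil, pow_succ]
      norm_num
      ring_nf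

theorem parse_natBits (n : Nat) :
    (natBits n).foldl (fun a c => 2 * a + (if c == '1' then 1 else 0)) 0 = (n : Int) := by
  induction n using Nat.strong_induction_on with
  | _ n ih =>
      by_cases h : n = 0
      · subst h; rw [natBits_zero]; simp
      · rw [natBits, dif_neg h, List.foldl_append,
            ih (n / 2) (Nat.div_lt_self (Nat.pos_of_ne_zero h) one_lt_two)]
        by_cases hm : n % 2 = 1 <;> simp [hm] <;> omega

theorem parse_nonneg (s : List Char) :
    0 ≤ s.foldl (fun (a : Int) c => 2 * a + (if c == '1' then 1 else 0)) 0 := by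
  have gen : ∀ (s : List Char) (a : Int), 0 ≤ a →
      0 ≤ s.foldl (fun (a : Int) c => 2 * a + (if c == '1' then 1 else 0)) a := by
    intro s
    induction s with
    | nil => intro a ha; simpa using ha
    | cons c s ih =>
        intro a ha
        simp only [List.foldl_cons]
        apply ih
        by_cases hc : c == '1' <;> simp [hc] <;> omega
  exact gen s 0 (le_refl (0:Int))

theorem int2?_getD_sane (s : List Char) (h1 : s ≠ [])
    (h2 : ∀ c ∈ s, c = '0' ∨ c = '1') :
    (int2? s).getD 0 = s.foldl (fun (a : Int) c => 2 * a + (if c == '1' then 1 else 0)) 0 := by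
  unfold int2?
  rw [if_pos ⟨h1, by
    rw [List.all_eq_true]
    intro c hc
    rcases h2 c hc with h | h <;> simp [h]⟩]
  rfl

theorem int2?_getD_nonneg (s : List Char) : 0 ≤ (int2? s).getD 0 := by
  unfold int2?
  split
  · exact parse_nonneg s
  · simp

-- ---- A-side characterisation ----
theorem fA_odd (n c k : Nat) (hk : 1 ≤ k) (hn : n = 2 ^ (k+1) * c + (2 ^ k - 1)) :
    f (Int.ofNat n) = Int.ofNat (n + 2 ^ (k-1)) := by
  have hp : 1 ≤ 2 ^ k := Nat.one_le_two_pow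
  have e1 : 2 ^ (k+1) = 2 * 2 ^ k := by rw [Nat.pow_succ]; ring
  have ek : k - 1 + 1 = k := by omega
  have e2 : 2 ^ k = 2 * 2 ^ (k-1) := by conv_lhs => rw [← ek, Nat.pow_succ, Nat.mul_comm]
  have hp1 : 1 ≤ 2 ^ (k-1) := Nat.one_le_two_pow
  have e4 : 2 ^ (k+1) * c = 2 * (2 ^ k * c) := by rw [e1]; ring
  have hodd : n % 2 = 1 := by omega
  have he2i : (2:Int) ^ k = 2 * 2 ^ (k-1) := by
    conv_lhs => rw [← ek, pow_succ, mul_comm]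
  simp only [f]
  rw [if_neg (by simp only [Int.ofNat_eq_natCast, beq_iff_eq]; omega)]
  have hbs : binStr (Int.ofNat n) = natBits n := by
    unfold binStr
    rw [if_neg (by rw [Int.ofNat_eq_natCast]; omega)]
    rfl
  rw [hbs]
  by_cases hc : c = 0
  · -- all-ones case: n = 2^k - 1
    subst hc
    have hn' : n = 2 ^ k - 1 := by omega
    rw [show natBits n = List.replicate k '1' from by rw [hn']; exact natBits_ones k]
    rw [List.length_replicate,
        scanIdx_ones _ _ (fun i hi => by
          rw [List.getD_eq_getElem?_getD, List.getElem?_replicate, if_pos hi]; rfl)]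
    rw [if_pos (by decide)]
    rw [show (1:Int) = ((1:Nat):Int) from rfl, PySem.List.slice_from_natCast,
        List.drop_replicate]
    rw [int2?_getD_sane _ (by simp) (by
      intro ch hch
      rcases hch with _ | ⟨_, hch⟩
      · right; rfl
      · rcases hch with _ | ⟨_, hch⟩
        · left; rfl
        · right; exact (List.eq_of_mem_replicate hch))]
    rw [List.foldl_cons, List.foldl_cons, parse_shift, parse_replicate_one,
        List.length_replicate, Int.ofNat_eq_natCast]
    norm_num
    push_cast [hn', hp, hp1]
    rw [he2i]
    ring
  · -- mixed case
    rw [show natBits n = natBits c ++ '0' :: List.replicate k '1' from by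
      rw [hn]; exact natBits_decomp c k hc hk]
    have hL1 : 1 ≤ (natBits c).length := List.length_pos_of_ne_nil (natBits_ne_nil c hc)
    have hlen : (natBits c ++ '0' :: List.replicate k '1').length
        = (natBits c).length + (k + 1) := by
      simp [List.length_append, List.length_replicate]
    rw [hlen]
    have hscan : scanIdx (natBits c ++ '0' :: List.replicate k '1')
        ((natBits c).length + (k + 1)) = ((natBits c).length : Int) := by
      apply scanIdx_find (natBits c ++ '0' :: List.replicate k '1') ((natBits c).length)
        ((natBits c).length + (k + 1)) (by omega)
      · intro i hi1 hi2
        rw [List.getD_eq_getElem?_getD, List.getElem?_append_right (by omega)]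
        obtain ⟨t, ht⟩ : ∃ t, i - (natBits c).length = t + 1 := ⟨i - (natBits c).length - 1, by omega⟩
        rw [ht, List.getElem?_cons_succ, List.getElem?_replicate, if_pos (by omega)]
        rfl
      · rw [List.getD_eq_getElem?_getD, List.getElem?_append_right (by omega)]
        simp
    rw [hscan]
    rw [if_neg (by simp only [beq_iff_eq]; omega)]
    rw [PySem.List.slice_to_natCast, List.take_left,
        show ((natBits c).length : Int) + 2 = (((natBits c).length + 2 : Nat) : Int) from by push_cast; ring,
        PySem.List.slice_from_natCast, List.drop_append,
        List.drop_eq_nil_of_le (by omega),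
        show (natBits c).length + 2 - (natBits c).length = 2 from by omega,
        List.nil_append,
        show ('0' :: List.replicate k '1').drop 2 = List.replicate (k - 1) '1' from by
          cases k with
          | zero => omega
          | succ k => simp [List.drop_replicate]]
    rw [int2?_getD_sane _ (by simp) (by
      intro ch hch
      rcases List.mem_append.mp hch with hch | hch
      · exact natBits_bits c ch hch
      · rcases hch with _ | ⟨_, hch⟩
        · right; rfl
        · rcases hch with _ | ⟨_, hch⟩
          · left; rfl
          · right; exact (List.eq_of_mem_replicate hch))]
    rw [List.foldl_append, parse_natBits, List.foldl_cons, List.foldl_cons, parse_shift,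
        parse_replicate_one, List.length_replicate, Int.ofNat_eq_natCast]
    norm_num
    have hge : 2 ^ (k+1) * c + (2 ^ k - 1) + 2 ^ (k-1) = 2 ^ (k+1) * c + 2 ^ k + 2 ^ (k-1) - 1 := by
      omega
    push_cast [hn, hge, hp, hp1]
    have he1i : (2:Int) ^ (k+1) = 2 * 2 ^ k := by rw [pow_succ]; ring
    rw [he1i, he2i]
    ring

theorem odd_decomp (n : Nat) (h : n % 2 = 1) :
    ∃ k c, 1 ≤ k ∧ n = 2 ^ (k+1) * c + (2 ^ k - 1) := by
  induction n using Nat.strong_induction_on with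
  | _ n ih =>
      by_cases h4 : n % 4 = 1
      · exact ⟨1, n / 4, by omega, by norm_num; omega⟩
      · have h43 : n % 4 = 3 := by omega
        have hm : (n - 1) / 2 < n := by omega
        have hmo : ((n - 1) / 2) % 2 = 1 := by omega
        obtain ⟨k, c, hk, hc⟩ := ih ((n - 1) / 2) hm hmo
        refine ⟨k + 1, c, by omega, ?_⟩
        have key : 2 * (2 ^ (k+1) * c + (2 ^ k - 1)) + 1 = 2 ^ (k+1+1) * c + (2 ^ (k+1) - 1) := by
          have hp : 1 ≤ 2 ^ k := Nat.one_le_two_pow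
          have e1 : 2 ^ (k+1) = 2 * 2 ^ k := by rw [Nat.pow_succ]; ring
          have e4 : 2 ^ (k+1+1) * c = 2 * (2 ^ (k+1) * c) := by rw [Nat.pow_succ 2 (k+1)]; ring
          omega
        have hn2 : n = 2 * ((n - 1) / 2) + 1 := by omega
        rw [hn2, hc, key]

-- ---- sign facts for Claim_exact ----
theorem f_nonneg_of_odd (x : Int) (ho : ¬ x % 2 = 0) : 0 ≤ f x := by
  simp only [f]
  rw [if_neg (by simp [ho])]
  split
  · exact int2?_getD_nonneg _
  · exact int2?_getD_nonneg _

theorem falt_neg (x : Int) (hx : x < 0) : f_alt x < 0 := by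
  simp only [f_alt]
  cases x with
  | ofNat n => exact absurd hx (by rw [Int.ofNat_eq_natCast]; omega)
  | negSucc a =>
      cases a with
      | zero =>
          rw [show Int.negSucc 0 + 1 = Int.ofNat 0 from rfl, int_not_negSucc,
              int_land_ofNat_ofNat, show (0 &&& 0 : Nat) = 0 from rfl,
              int_lor_negSucc_ofNat, int_shiftRight_ofNat,
              show (0 : Nat) >>> 1 = 0 from rfl, int_not_ofNat, int_land_negSucc_negSucc]
          exact Int.negSucc_lt_zero _
      | succ b =>
          rw [int_negSucc_add_one, int_not_negSucc, int_land_negSucc_ofNat,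
              int_lor_negSucc_ofNat, int_shiftRight_ofNat, int_not_ofNat,
              int_land_negSucc_negSucc]
          exact Int.negSucc_lt_zero _

-- ---- witness computations ----
theorem natBits_one : natBits 1 = ['1'] := by
  rw [show (1:Nat) = 2*0+1 from rfl, natBits_two_mul_add_one, natBits_zero]
  rfl

theorem f_neg_one : f (-1) = 5 := by
  have hbs : binStr (-1) = ['b', '1'] := by
    unfold binStr
    rw [if_pos (by decide), show ((-(-1) : Int)).toNat = 1 from rfl, natBits_one]
  simp only [f]
  rw [hbs]
  decide

theorem falt_neg_one : f_alt (-1) = -1 := by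
  simp only [f_alt]
  rw [show (-1 : Int) + 1 = Int.ofNat 0 from rfl, show Int.not (-1) = Int.ofNat 0 from rfl,
      int_land_ofNat_ofNat, show (0 &&& 0 : Nat) = 0 from rfl,
      show (-1 : Int) = Int.negSucc 0 from rfl, int_lor_negSucc_ofNat,
      show Nat.ldiff 0 0 = 0 from by norm_num [Nat.ldiff, Nat.bitwise],
      int_shiftRight_ofNat, show (0 : Nat) >>> 1 = 0 from rfl, int_not_ofNat,
      int_land_negSucc_negSucc]
  rfl

-- ===== VERDICT (by name: the statement is the Claim_ definition above) =====
theorem f_spec : Claim_unchanged_f := by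
  intro x _ hpre hD
  by_cases he : x % 2 = 0
  · rw [falt_even x he]
    simp only [f]
    rw [if_pos (by simp [he])]
  · have hx0 : 0 ≤ x := by
      by_contra hneg
      push_neg at hneg
      have hone : x % 2 = 1 := by omega
      rcases hpre with h | h | h
      · omega
      · omega
      · exact hD ⟨hneg, hone, h⟩
    obtain ⟨n, hn⟩ := Int.eq_ofNat_of_zero_le hx0
    have hodd : n % 2 = 1 := by
      subst hn
      omega
    obtain ⟨k, c, hk, hdec⟩ := odd_decomp n hodd
    subst hn
    rw [show ((n : Int)) = Int.ofNat n from rfl, fA_odd n c k hk hdec, falt_odd n c k hk hdec]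

theorem f_changed : Claim_changed_f := by
  unfold Claim_changed_f
  refine ⟨by decide, by decide, by decide, f_neg_one, falt_neg_one, by decide⟩

theorem f_tight : Claim_exact_f := by
  intro x _ _ hD
  have h1 : 0 ≤ f x := f_nonneg_of_odd x (by have := hD.2.1; omega)
  have h2 : f_alt x < 0 := falt_neg x hD.1
  omega
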